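-- pv_equiv track=rewrite | github.com/iThrive-AI-LLC/ithriveai-job-risk-analyzer | bls_job_mapper.py | standardize_job_title
-- ===== SOURCE A (Python) =====
-- def standardize_job_title(title: str) -> str:
--     """Standardize job title format for consistent mapping."""
--     standardized = title.lower().strip()
--     suffixes = [" i", " ii", " iii", " iv", " v", " specialist", " assistant", " associate", " senior", " junior", " lead"]
--     for suffix in suffixes:
--         if standardized.endswith(suffix):
--             standardized = standardized[:-len(suffix)].strip()
--             break
--     return standardized
-- ===== SOURCE B (Python) =====
-- SUFFIX_WORDS = {"i", "ii", "iii", "iv", "v", "specialist", "assistant", "associate", "senior", "junior", "lead"}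
--
-- def standardize_job_title(title: str) -> str:
--     """Standardize job title format for consistent mapping."""
--     s = title.lower().strip()
--     words = s.split(" ")
--     if len(words) > 1 and words[-1] in SUFFIX_WORDS:
--         return " ".join(words[:-1]).strip()
--     return s
-- ===== Notes on version B (the rewrite author's own statement) =====
-- stated objective: simpler
-- what changed: Replaces A's ordered endswith-and-slice scan over the eleven space-prefixed suffix strings by a single tokenization (split on a literal space) plus one set-membership test on the last token, rejoining and stripping the remaining tokens.
import Mathlib
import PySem

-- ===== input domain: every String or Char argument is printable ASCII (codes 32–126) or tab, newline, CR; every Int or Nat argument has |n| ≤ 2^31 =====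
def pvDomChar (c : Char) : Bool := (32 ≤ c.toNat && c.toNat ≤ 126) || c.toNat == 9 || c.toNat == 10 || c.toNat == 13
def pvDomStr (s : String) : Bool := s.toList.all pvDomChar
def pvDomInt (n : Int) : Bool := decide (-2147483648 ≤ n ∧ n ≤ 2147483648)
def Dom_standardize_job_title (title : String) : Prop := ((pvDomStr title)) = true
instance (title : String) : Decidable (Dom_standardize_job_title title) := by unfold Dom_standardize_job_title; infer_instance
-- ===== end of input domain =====

-- B replaces A's ordered endswith-suffix loop by one split on " " plus a set lookup on the last word (objective: simpler/idiomatic).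

-- ===== PORT A =====
-- the 'for suffix in suffixes: if standardized.endswith(suffix): …; break' loop of A
def pvStdLoop (standardized : String) : List String → String
  | [] => standardized
  | suffix :: rest =>
    if PySem.Str.endswith standardized suffix then
      PySem.Str.strip (PySem.Str.slice standardized none (some (-(PySem.Str.len suffix))))
    else pvStdLoop standardized rest

def standardize_job_title (title : String) : String :=
  let standardized := PySem.Str.strip (PySem.Str.lower title)
  pvStdLoop standardized
    [" i", " ii", " iii", " iv", " v", " specialist", " assistant", " associate", " senior", " junior", " lead"]

-- ===== PORT B =====
def pvSuffixWords : PySem.Set String :=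
  PySem.Set.ofList ["i", "ii", "iii", "iv", "v", "specialist", "assistant", "associate", "senior", "junior", "lead"]

def standardize_job_title_alt (title : String) : String :=
  let s := PySem.Str.strip (PySem.Str.lower title)
  let words := (PySem.Str.split? s " ").getD []
  if 1 < words.length ∧ PySem.Set.contains pvSuffixWords (PySem.List.pyGetD words (-1) "") = true then
    PySem.Str.strip (PySem.Str.join " " (PySem.List.slice words none (some (-1))))
  else s

-- ===== PRECONDITION & SPEC =====
def Spec_standardize_job_title (title : String) (out : String) : Prop := out = standardize_job_title_alt title
instance (title : String) (out : String) : Decidable (Spec_standardize_job_title title out) := by unfold Spec_standardize_job_title; infer_instance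

-- ===== CLAIM (what is proved, stated in full; the proofs are below) =====
def Claim_equal_standardize_job_title : Prop := ∀ (title : String), Dom_standardize_job_title title → Spec_standardize_job_title title (standardize_job_title title)

-- ===== LEMMAS AND PROOFS =====

-- the 11 suffix words, as used by the proofs
def pvW : List String := ["i", "ii", "iii", "iv", "v", "specialist", "assistant", "associate", "senior", "junior", "lead"]

lemma pv_go (c : Char) : ∀ (fuel : Nat) (l cur : List Char) (acc : List (List Char)), l.length < fuel →
    PySem.Chars.splitOn.go [c] fuel l cur acc =
      acc.reverse ++ (l.splitOn c).modifyHead (fun p => cur.reverse ++ p) := by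
  intro fuel
  induction fuel with
  | zero => intro l cur acc h; exact absurd h (by omega)
  | succ fuel ih =>
    intro l cur acc h
    cases l with
    | nil =>
      simp [PySem.Chars.splitOn.go, List.splitOn, List.splitOnP_nil]
    | cons a rest =>
      rw [PySem.Chars.splitOn.go]
      by_cases hca : c = a
      · subst hca
        rw [if_pos (by simp [List.isPrefixOf])]
        rw [ih _ _ _ (by simpa using Nat.lt_of_succ_lt_succ h)]
        rw [show (c :: rest).splitOn c = [] :: rest.splitOn c by
          simp [List.splitOn, List.splitOnP_cons]]
        rcases hsp : List.splitOn c rest with _ | ⟨hd, tl⟩ <;> simp [hsp]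
      · rw [if_neg (by simp [List.isPrefixOf]; exact hca)]
        rw [ih _ _ _ (Nat.lt_of_succ_lt_succ h)]
        rw [show (a :: rest).splitOn c = (rest.splitOn c).modifyHead (List.cons a) by
          simp [List.splitOn, List.splitOnP_cons, Ne.symm hca]]
        obtain ⟨hd, tl, hh⟩ := List.exists_cons_of_ne_nil (List.splitOnP_ne_nil (· == c) rest)
        rw [show rest.splitOn c = hd :: tl from hh]
        simp

lemma pv_splitOn_eq (s : List Char) (c : Char) : PySem.Chars.splitOn s [c] = s.splitOn c := by
  rw [PySem.Chars.splitOn, pv_go c (s.length + 1) s [] [] (by omega)]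
  obtain ⟨hd, tl, hh⟩ := List.exists_cons_of_ne_nil (List.splitOnP_ne_nil (· == c) s)
  rw [show s.splitOn c = hd :: tl from hh]
  simp

lemma pv_intercalate_concat {α : Type} (x : α) (l : List (List α)) (y : List α) (h : l ≠ []) :
    [x].intercalate (l ++ [y]) = [x].intercalate l ++ x :: y := by
  induction l with
  | nil => exact absurd rfl h
  | cons a l ih =>
    cases l with
    | nil => simp [List.intercalate, List.intersperse]
    | cons b m =>
      have := ih (by simp)
      simp only [List.intercalate, List.intersperse, List.cons_append, List.flatten_cons] at this ⊢
      simp [this]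

lemma pv_pyGetD_concat {α : Type} (xs : List α) (y : α) (d : α) :
    PySem.List.pyGetD (xs ++ [y]) (-1) d = y := by
  simp [PySem.List.pyGetD, PySem.List.pyGet?, PySem.List.pyIdx?]

lemma pv_slice_dropLast {α : Type} (xs : List α) (h : xs ≠ []) :
    PySem.List.slice xs none (some (-1)) = xs.dropLast := by
  have hl : 0 < xs.length := List.length_pos_of_ne_nil h
  simp only [PySem.List.slice, PySem.List.clampIdx]
  rw [if_pos (by omega), if_neg (by omega)]
  have : ((xs.length : Int) + -1).toNat = xs.length - 1 := by omega
  simp [this, List.dropLast_eq_take]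

lemma pv_slice_cut {α : Type} (t w : List α) (x : α) :
    PySem.List.slice (t ++ x :: w) none (some (-((w.length + 1 : Nat) : Int))) = t := by
  simp only [PySem.List.slice, PySem.List.clampIdx]
  rw [if_pos (by push_cast; omega), if_neg (by simp; omega)]
  have : (((t ++ x :: w).length : Int) + -((w.length + 1 : Nat) : Int)).toNat = t.length := by
    simp; omega
  rw [this]
  simp [List.take_left (l₁ := t) (l₂ := x :: w)]

lemma pvStdLoop_nomatch (s : String) (l : List String)
    (h : ∀ suf ∈ l, PySem.Str.endswith s suf = false) : pvStdLoop s l = s := by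
  induction l with
  | nil => rfl
  | cons a rest ih =>
    have ha' : PySem.Str.endswith s a = false := h a (by simp)
    rw [pvStdLoop, if_neg (by simp only [ha']; simp)]
    exact ih (fun suf hs => h suf (by simp [hs]))

lemma pvStdLoop_hit (s : String) (l : List String) (suf : String)
    (h1 : suf ∈ l) (h2 : PySem.Str.endswith s suf = true)
    (h3 : ∀ u ∈ l, u ≠ suf → PySem.Str.endswith s u = false) :
    pvStdLoop s l = PySem.Str.strip (PySem.Str.slice s none (some (-(PySem.Str.len suf)))) := by
  induction l with
  | nil => exact absurd h1 (by simp)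
  | cons a rest ih =>
    by_cases ha : a = suf
    · subst ha; rw [pvStdLoop, if_pos h2]
    · have ha' : PySem.Str.endswith s a = false := h3 a (by simp) ha
      rw [pvStdLoop, if_neg (by simp only [ha']; simp)]
      have h1' : suf ∈ rest := by
        rcases List.mem_cons.mp h1 with h | h
        · exact absurd h.symm ha
        · exact h
      exact ih h1' (fun u hu hne => h3 u (by simp [hu]) hne)

lemma pv_main (s : String) :
    pvStdLoop s [" i", " ii", " iii", " iv", " v", " specialist", " assistant", " associate", " senior", " junior", " lead"] =
      (let words := (PySem.Str.split? s " ").getD []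
       if 1 < words.length ∧ PySem.Set.contains pvSuffixWords (PySem.List.pyGetD words (-1) "") = true then
         PySem.Str.strip (PySem.Str.join " " (PySem.List.slice words none (some (-1))))
       else s) := by
  have hsf : ∀ x ∈ pvW, ' ' ∉ x.toList := by decide
  have hwsuf : ∀ x ∈ pvW, (" " ++ x) ∈
      ([" i", " ii", " iii", " iv", " v", " specialist", " assistant", " associate", " senior", " junior", " lead"] : List String) := by decide
  have hsufw : ∀ suf ∈ ([" i", " ii", " iii", " iv", " v", " specialist", " assistant", " associate", " senior", " junior", " lead"] : List String),
      ∃ x ∈ pvW, suf = " " ++ x := by decide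
  have htl : ∀ x : String, (" " ++ x).toList = ' ' :: x.toList := by
    intro x; simp [String.toList_append]
  set ws := s.toList.splitOn ' ' with hws
  have hwords : (PySem.Str.split? s " ").getD [] = ws.map String.ofList := by
    simp only [PySem.Str.split?, PySem.Chars.split?]
    rw [show (" " : String).toList = [' '] from rfl]
    simp [pv_splitOn_eq, hws]
  have hend : ∀ x : String, PySem.Str.endswith s (" " ++ x) = true ↔ (' ' :: x.toList) <:+ s.toList := by
    intro x; rw [PySem.Str.endswith_eq, htl, ← PySem.Chars.endswith_iff]
  show _ = (if 1 < ((PySem.Str.split? s " ").getD []).length ∧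
      PySem.Set.contains pvSuffixWords (PySem.List.pyGetD ((PySem.Str.split? s " ").getD []) (-1) "") = true then
        PySem.Str.strip (PySem.Str.join " " (PySem.List.slice ((PySem.Str.split? s " ").getD []) none (some (-1))))
      else s)
  by_cases hm : ∃ x ∈ pvW, (' ' :: x.toList) <:+ s.toList
  · obtain ⟨x, hx, t, ht⟩ := hm
    -- ht : t ++ ' ' :: x.toList = s.toList
    have husw : ws = t.splitOn ' ' ++ [x.toList] := by
      rw [hws, ← ht]
      simp only [List.splitOn]
      rw [List.splitOnP_append_cons _ _ _ _ (by simp)]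
      congr 1
      exact List.splitOnP_eq_single _ _ (fun ch hch => by
        simp only [beq_iff_eq]; rintro rfl; exact hsf x hx hch)
    have huniq : ∀ y ∈ pvW, PySem.Str.endswith s (" " ++ y) = true → y = x := by
      intro y hy hsy
      rw [hend] at hsy
      have hx' : (' ' :: x.toList) <:+ s.toList := ⟨t, ht⟩
      by_cases hl : y.toList.length ≤ x.toList.length
      · obtain ⟨pre, hpre⟩ := List.suffix_of_suffix_length_le hsy hx' (Nat.succ_le_succ hl)
        cases pre with
        | nil =>
          have : y.toList = x.toList := by simpa using hpre
          have := congrArg String.ofList this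
          simpa [String.ofList_toList] using this
        | cons p ps =>
          exfalso
          apply hsf x hx
          have : ps ++ ' ' :: y.toList = x.toList := by
            have := hpre
            simp only [List.cons_append] at this
            exact (List.cons.injEq _ _ _ _ ▸ this : _) |>.2
          rw [← this]; simp
      · obtain ⟨pre, hpre⟩ := List.suffix_of_suffix_length_le hx' hsy (Nat.succ_le_succ (by omega))
        cases pre with
        | nil =>
          have : x.toList = y.toList := by simpa using hpre
          have := congrArg String.ofList this
          simpa [String.ofList_toList] using this.symm
        | cons p ps =>
          exfalso
          apply hsf y hy
          have : ps ++ ' ' :: x.toList = y.toList := by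
            have := hpre
            simp only [List.cons_append] at this
            exact (List.cons.injEq _ _ _ _ ▸ this : _) |>.2
          rw [← this]; simp
    have hA : pvStdLoop s [" i", " ii", " iii", " iv", " v", " specialist", " assistant", " associate", " senior", " junior", " lead"] =
        PySem.Str.strip (PySem.Str.slice s none (some (-(PySem.Str.len (" " ++ x))))) := by
      apply pvStdLoop_hit _ _ _ (hwsuf x hx) ((hend x).mpr ⟨t, ht⟩)
      intro u hu hne
      obtain ⟨y, hy, rfl⟩ := hsufw u hu
      cases hcase : PySem.Str.endswith s (" " ++ y)
      · rfl
      · exact absurd (by rw [huniq y hy hcase]) hne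
    have hlen : PySem.Str.len (" " ++ x) = ((x.toList.length + 1 : Nat) : Int) := by
      rw [PySem.Str.len_eq, htl]; simp
    have hAval : PySem.Str.strip (PySem.Str.slice s none (some (-(PySem.Str.len (" " ++ x))))) =
        String.ofList (PySem.Chars.strip t) := by
      show String.ofList (PySem.Chars.strip (PySem.Str.slice s none (some (-(PySem.Str.len (" " ++ x))))).toList) = _
      rw [PySem.Str.toList_slice, hlen]
      have : PySem.Chars.slice s.toList none (some (-((x.toList.length + 1 : Nat) : Int))) = t := by
        show PySem.List.slice s.toList none (some (-((x.toList.length + 1 : Nat) : Int))) = t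
        rw [← ht]; exact pv_slice_cut t x.toList ' '
      rw [this]
    have hwordsv : (PySem.Str.split? s " ").getD [] = (t.splitOn ' ').map String.ofList ++ [x] := by
      rw [hwords, husw]; simp [String.ofList_toList]
    have htne : t.splitOn ' ' ≠ [] := by
      simp only [List.splitOn]; exact List.splitOnP_ne_nil _ _
    have hlen2 : 1 < ((t.splitOn ' ').map String.ofList ++ [x]).length := by
      have := List.length_pos_of_ne_nil htne
      simp; omega
    have hcont : PySem.Set.contains pvSuffixWords x = true := by
      have hset : pvSuffixWords = pvW := by decide
      rw [hset]
      exact List.elem_eq_true_of_mem hx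
    rw [hA, hAval, hwordsv, if_pos ⟨hlen2, by rw [pv_pyGetD_concat]; exact hcont⟩]
    rw [pv_slice_dropLast _ (by simp), List.dropLast_concat]
    show _ = String.ofList (PySem.Chars.strip (PySem.Str.join " " ((t.splitOn ' ').map String.ofList)).toList)
    rw [PySem.Str.toList_join]
    have : PySem.Chars.join (" " : String).toList (((t.splitOn ' ').map String.ofList).map String.toList) = t := by
      rw [show (" " : String).toList = [' '] from rfl]
      show [' '].intercalate (((t.splitOn ' ').map String.ofList).map String.toList) = t
      have h2 : (((t.splitOn ' ').map String.ofList).map String.toList) = t.splitOn ' ' := by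
        rw [List.map_map]; simp [Function.comp_def]
      rw [h2]
      exact List.intercalate_splitOn t ' '
    rw [this]
  · have hA : pvStdLoop s [" i", " ii", " iii", " iv", " v", " specialist", " assistant", " associate", " senior", " junior", " lead"] = s := by
      apply pvStdLoop_nomatch
      intro suf hsu
      obtain ⟨y, hy, rfl⟩ := hsufw suf hsu
      cases hcase : PySem.Str.endswith s (" " ++ y)
      · rfl
      · exact absurd ⟨y, hy, (hend y).mp hcase⟩ hm
    rw [hA, if_neg]
    rintro ⟨hl, hc⟩
    rw [hwords] at hl hc
    have hne : ws ≠ [] := by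
      rw [hws]; simp only [List.splitOn]; exact List.splitOnP_ne_nil _ _
    have hmapdec : ws.map String.ofList = (ws.dropLast.map String.ofList) ++ [String.ofList (ws.getLast hne)] := by
      conv_lhs => rw [← List.dropLast_append_getLast hne]
      simp
    rw [hmapdec, pv_pyGetD_concat] at hc
    have hmem : String.ofList (ws.getLast hne) ∈ pvW := by
      have hset : pvSuffixWords = pvW := by decide
      rw [hset] at hc
      exact List.mem_of_elem_eq_true hc
    have hdne : ws.dropLast ≠ [] := by
      have h2 : 1 < ws.length := by simpa using hl
      have : 0 < ws.dropLast.length := by rw [List.length_dropLast]; omega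
      exact List.ne_nil_of_length_pos this
    have hsufx : (' ' :: ws.getLast hne) <:+ s.toList := by
      refine ⟨[' '].intercalate ws.dropLast, ?_⟩
      have h1 : [' '].intercalate ws = s.toList := by
        rw [hws]; exact List.intercalate_splitOn s.toList ' '
      rw [← h1]
      conv_rhs => rw [← List.dropLast_append_getLast hne]
      rw [pv_intercalate_concat _ _ _ hdne]
    exact hm ⟨String.ofList (ws.getLast hne), hmem, by rw [String.toList_ofList]; exact hsufx⟩

-- ===== VERDICT (by name: the statement is the Claim_ definition above) =====
theorem standardize_job_title_spec : Claim_equal_standardize_job_title := by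
  intro title _
  show standardize_job_title title = standardize_job_title_alt title
  rw [standardize_job_title, standardize_job_title_alt]
  exact pv_main _
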